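-- pv_equiv track=rewrite | github.com/Jack960317/OrderVis | PredictCovid.py | GetSenList
-- ===== SOURCE A (Python) =====
-- def GetSenList(myinput,model='clause'):
--
--     senList=[]
--     #只预测一天，只要最后十五天的数据
--     tempList=myinput.split()[-15:]
--
--     if model=='word':
--         senList=tempList
--     else:
--         senten = ''
--         count = 0
--         for number in tempList:
--             senten += str(number)+' '
--             count += 1
--             if(count>=3):
--                 senList.append(senten)
--                 senten=''
--                 count=0
--
--         if senten:
--             senList.append(senten)
--
--
--     return senList
-- ===== SOURCE B (Python) =====
-- def GetSenList(myinput, model='clause'):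
--     tempList = myinput.split()[-15:]
--     if model == 'word':
--         return tempList
--
--     def chunks(xs):
--         if not xs:
--             return []
--         return [' '.join(xs[:3]) + ' '] + chunks(xs[3:])
--
--     return chunks(tempList)
-- ===== Notes on version B (the rewrite author's own statement) =====
-- stated objective: simpler
-- what changed: Replaced the accumulator-string-plus-running-counter loop (with a separate trailing flush) by a direct recursive chunking of the last-15 token list into stride-3 slices joined with spaces, eliminating the mutable counter and leftover-buffer logic.
import Mathlib
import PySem

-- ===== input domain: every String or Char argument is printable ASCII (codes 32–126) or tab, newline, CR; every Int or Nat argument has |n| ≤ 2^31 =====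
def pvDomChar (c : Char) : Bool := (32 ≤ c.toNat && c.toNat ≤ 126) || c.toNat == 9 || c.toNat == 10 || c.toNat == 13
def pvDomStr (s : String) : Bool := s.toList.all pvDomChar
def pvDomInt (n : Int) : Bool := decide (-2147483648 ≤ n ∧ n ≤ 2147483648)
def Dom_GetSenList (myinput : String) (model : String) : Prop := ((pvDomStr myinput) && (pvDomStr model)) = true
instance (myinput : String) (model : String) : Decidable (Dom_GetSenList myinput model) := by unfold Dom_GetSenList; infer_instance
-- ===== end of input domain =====

-- B replaces A's accumulator-plus-counter loop by direct recursive stride-3 chunking (simpler decomposition, same cost).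

-- ===== PORT A =====
-- one step of A's for-loop: state (senList, senten, count)
def pvStepA (p : List String × String × Int) (number : String) : List String × String × Int :=
  let senten := p.2.1 ++ number ++ " "    -- senten += str(number)+' '  (number is already a str)
  let count := p.2.2 + 1
  if count ≥ 3 then (p.1 ++ [senten], "", 0) else (p.1, senten, count)

def GetSenList (myinput : String) (model : String) : List String :=
  let tempList := PySem.List.slice (PySem.Str.split₀ myinput) (some (-15)) none
  if model = "word" then tempList
  else
    let st := tempList.foldl pvStepA ([], "", 0)
    if st.2.1 = "" then st.1 else st.1 ++ [st.2.1]   -- 'if senten:' = nonempty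

-- ===== PORT B =====
-- Source B's recursive chunks helper: [' '.join(xs[:3]) + ' '] + chunks(xs[3:])
def pvChunks3 : List String → List String
  | [] => []
  | x :: xs => (PySem.Str.join " " ((x :: xs).take 3) ++ " ") :: pvChunks3 (xs.drop 2)
termination_by xs => xs.length
decreasing_by simp

def GetSenList_alt (myinput : String) (model : String) : List String :=
  let tempList := PySem.List.slice (PySem.Str.split₀ myinput) (some (-15)) none
  if model = "word" then tempList
  else pvChunks3 tempList

-- ===== PRECONDITION & SPEC =====
def Spec_GetSenList (myinput : String) (model : String) (out : List String) : Prop := out = GetSenList_alt myinput model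
instance (myinput : String) (model : String) (out : List String) : Decidable (Spec_GetSenList myinput model out) := by unfold Spec_GetSenList; infer_instance

-- ===== CLAIM (what is proved, stated in full; the proofs are below) =====
def Claim_equal_GetSenList : Prop := ∀ (myinput : String) (model : String), Dom_GetSenList myinput model → Spec_GetSenList myinput model (GetSenList myinput model)

-- ===== LEMMAS AND PROOFS =====

theorem pv_join1 (a : String) : PySem.Str.join " " [a] = a := by
  apply String.toList_inj.mp
  simp [PySem.Str.toList_join, PySem.Chars.join, List.intercalate]

theorem pv_join2 (a b : String) :
    PySem.Str.join " " [a, b] ++ " " = a ++ " " ++ b ++ " " := by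
  apply String.toList_inj.mp
  simp [PySem.Str.toList_join, PySem.Chars.join, List.intercalate, List.intersperse]

theorem pv_join3 (a b c : String) :
    PySem.Str.join " " [a, b, c] ++ " " = a ++ " " ++ b ++ " " ++ c ++ " " := by
  apply String.toList_inj.mp
  simp [PySem.Str.toList_join, PySem.Chars.join, List.intercalate, List.intersperse]

-- A's loop (started on a fresh chunk) followed by the flush equals acc ++ chunks
theorem pv_loop_eq (l : List String) (acc : List String) :
    (let st := l.foldl pvStepA (acc, "", 0)
     if st.2.1 = "" then st.1 else st.1 ++ [st.2.1]) = acc ++ pvChunks3 l := by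
  induction l using pvChunks3.induct generalizing acc with
  | case1 => simp [pvChunks3]
  | case2 x xs ih =>
    match xs with
    | [] =>
      simp only [List.foldl, pvStepA, pvChunks3]
      norm_num
      simp [pv_join1, pvChunks3]
    | [b] =>
      simp only [List.foldl, pvStepA, pvChunks3]
      norm_num
      simp [pv_join2, pvChunks3]
    | b :: c :: t =>
      simp only [List.foldl, pvStepA, pvChunks3]
      norm_num
      have := ih (acc := acc ++ [x ++ " " ++ b ++ " " ++ c ++ " "])
      simp only [List.drop] at this
      rw [this, pv_join3, List.append_assoc]
      simp

-- ===== VERDICT (by name: the statement is the Claim_ definition above) =====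
theorem GetSenList_spec : Claim_equal_GetSenList := by
  intro myinput model _
  unfold Spec_GetSenList GetSenList GetSenList_alt
  by_cases h : model = "word"
  · simp [h]
  · simp only [h, if_false]
    exact pv_loop_eq _ []
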